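-- pv_equiv track=rewrite | github.com/saleprobe/Algorithm | Programmers/throwing_a_ball.py | solution
-- ===== SOURCE A (Python) =====
-- def solution(numbers, k):
--     count = 0
--     num = 1
--     pre_num = 0
--     while (count < k):
--         count += 1
--         pre_num = num
--         num += 2
--         if num > len(numbers):
--             num = num - len(numbers)
--     return pre_num
-- ===== SOURCE B (Python) =====
-- def solution(numbers, k):
--     # Closed form: the ball holder after t throws is position ((2*t) % n) + 1,
--     # so the k-th throw is made from ((2*(k-1)) % n) + 1.  With k <= 0 no throw happens.
--     if k <= 0:
--         return 0
--     n = len(numbers)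
--     return (2 * (k - 1)) % n + 1
-- ===== Notes on version B (the rewrite author's own statement) =====
-- stated objective: faster
-- what changed: Replaced the k-iteration simulation loop with the closed-form modular formula ((2*(k-1)) % len(numbers)) + 1.
-- intended difference: On a single-element numbers list with k >= 2, A returns k because its wrap-around subtracts the length only once per step so the position escapes the circle, while B returns 1, the only position in a one-person circle, which is the intended value. — e.g. on solution([5], 2): A returns 2, B returns 1
-- outside the precondition, e.g. on solution([], 2): A returns 3, B raises ZeroDivisionError
import Mathlib
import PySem

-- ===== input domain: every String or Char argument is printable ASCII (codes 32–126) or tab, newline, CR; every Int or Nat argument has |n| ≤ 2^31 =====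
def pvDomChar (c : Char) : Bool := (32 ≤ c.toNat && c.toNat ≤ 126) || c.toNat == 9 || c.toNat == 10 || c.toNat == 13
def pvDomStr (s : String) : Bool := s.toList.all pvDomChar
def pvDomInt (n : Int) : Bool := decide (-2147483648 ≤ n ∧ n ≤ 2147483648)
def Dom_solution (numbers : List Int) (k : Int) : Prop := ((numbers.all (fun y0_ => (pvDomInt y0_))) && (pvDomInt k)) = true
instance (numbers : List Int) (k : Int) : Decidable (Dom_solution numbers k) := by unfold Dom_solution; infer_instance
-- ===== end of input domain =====

-- ===== PORT A =====
-- Literal port of A: the while loop runs k times (state: pre_num, num), wrapping num once when it exceeds len(numbers).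
def solLoopA (n : Int) : Nat → Int × Int → Int × Int
  | 0, s => s
  | t + 1, (_pre, num) =>
      let pre' := num
      let num' := num + 2
      let num'' := if num' > n then num' - n else num'
      solLoopA n t (pre', num'')

def solution (numbers : List Int) (k : Int) : Int :=
  (solLoopA (numbers.length : Int) k.toNat (0, 1)).1

-- ===== PORT B =====
-- Port of B: closed form ((2*(k-1)) % n) + 1; 0 when no throw happens.
def solution_alt (numbers : List Int) (k : Int) : Int :=
  if k ≤ 0 then 0
  else PySem.Int.mod (2 * (k - 1)) (numbers.length : Int) + 1

-- ===== PRECONDITION & SPEC =====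
-- Pre_ excludes only the empty list, on which B's modular formula divides by zero (Python ZeroDivisionError) while A returns 2*k-1 from its unguarded wrap.
def Pre_solution (numbers : List Int) (k : Int) : Prop := numbers ≠ []
instance (numbers : List Int) (k : Int) : Decidable (Pre_solution numbers k) := by unfold Pre_solution; infer_instance
def pvWitness_solution : List Int × Int := ([1, 2, 3], 4)

-- On a single-element numbers list with k >= 2, A returns k (its wrap subtracts the length only once per step, so the position escapes the circle), while B returns 1, the only position in a one-person circle — the intended value.
def D_solution (numbers : List Int) (k : Int) : Prop := numbers.length = 1 ∧ 2 ≤ k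
instance (numbers : List Int) (k : Int) : Decidable (D_solution numbers k) := by unfold D_solution; infer_instance

def Spec_solution (numbers : List Int) (k : Int) (out : Int) : Prop := ¬ D_solution numbers k → out = solution_alt numbers k
instance (numbers : List Int) (k : Int) (out : Int) : Decidable (Spec_solution numbers k out) := by unfold Spec_solution; infer_instance

def pvDiffWitness_solution : List Int × Int := ([5], 2)
def pvDiffWitnessOut_solution : Int × Int := (2, 1)

-- ===== CLAIM (what is proved, stated in full; the proofs are below) =====
def Claim_unchanged_solution : Prop := ∀ (numbers : List Int) (k : Int), Dom_solution numbers k → Pre_solution numbers k → Spec_solution numbers k (solution numbers k)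
def Claim_changed_solution : Prop := Dom_solution (pvDiffWitness_solution.1) (pvDiffWitness_solution.2) ∧ Pre_solution (pvDiffWitness_solution.1) (pvDiffWitness_solution.2) ∧ D_solution (pvDiffWitness_solution.1) (pvDiffWitness_solution.2) ∧ solution (pvDiffWitness_solution.1) (pvDiffWitness_solution.2) = pvDiffWitnessOut_solution.1 ∧ solution_alt (pvDiffWitness_solution.1) (pvDiffWitness_solution.2) = pvDiffWitnessOut_solution.2 ∧ pvDiffWitnessOut_solution.1 ≠ pvDiffWitnessOut_solution.2
def Claim_exact_solution : Prop := ∀ (numbers : List Int) (k : Int), Dom_solution numbers k → Pre_solution numbers k → D_solution numbers k → solution numbers k ≠ solution_alt numbers k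

-- ===== LEMMAS AND PROOFS =====

-- Invariant for n ≥ 2: starting from num = m with 1 ≤ m ≤ n, after t+1 steps pre_num = (m - 1 + 2*t) % n + 1.
lemma solLoopA_fst (n : Int) (hn : 2 ≤ n) :
    ∀ (t : Nat) (p m : Int), 1 ≤ m → m ≤ n →
      (solLoopA n (t + 1) (p, m)).1 = (m - 1 + 2 * (t : Int)) % n + 1 := by
  intro t
  induction t with
  | zero =>
    intro p m h1 h2
    have hm : (m - 1) % n = m - 1 := Int.emod_eq_of_lt (by omega) (by omega)
    simp only [solLoopA, Nat.cast_zero, mul_zero, add_zero]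
    omega
  | succ t ih =>
    intro p m h1 h2
    by_cases h : m + 2 > n
    · rw [show (solLoopA n (t + 1 + 1) (p, m)).1 = (solLoopA n (t + 1) (m, m + 2 - n)).1 from by
        simp [solLoopA, h]]
      rw [ih m (m + 2 - n) (by omega) (by omega)]
      rw [show m + 2 - n - 1 + 2 * (t : Int) = m - 1 + 2 * ((t : Int) + 1) + n * (-1) by ring,
        Int.add_mul_emod_self_left]
      push_cast; ring_nf
    · rw [show (solLoopA n (t + 1 + 1) (p, m)).1 = (solLoopA n (t + 1) (m, m + 2)).1 from by
        simp [solLoopA, h]]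
      rw [ih m (m + 2) (by omega) (by omega)]
      push_cast; ring_nf

-- For n = 1 the loop just advances by one each step: pre_num after t+1 steps from num = m is m + t.
lemma solLoopA_one_fst :
    ∀ (t : Nat) (p m : Int), 1 ≤ m →
      (solLoopA 1 (t + 1) (p, m)).1 = m + (t : Int) := by
  intro t
  induction t with
  | zero => intro p m h1; simp [solLoopA]
  | succ t ih =>
    intro p m h1
    have hgt : m + 2 > (1 : Int) := by omega
    rw [show (solLoopA 1 (t + 1 + 1) (p, m)).1 = (solLoopA 1 (t + 1) (m, m + 2 - 1)).1 from by
      simp [solLoopA, hgt]]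
    rw [ih m (m + 2 - 1) (by omega)]
    push_cast; ring

lemma solution_closed (numbers : List Int) (k : Int) (hk : 1 ≤ k)
    (hn : 2 ≤ (numbers.length : Int)) :
    solution numbers k = (2 * (k - 1)) % (numbers.length : Int) + 1 := by
  unfold solution
  have hkt : k.toNat = (k - 1).toNat + 1 := by omega
  rw [hkt, solLoopA_fst _ hn _ _ _ (by omega) (by omega)]
  have : ((1 : Int) - 1 + 2 * ((k - 1).toNat : Int)) = 2 * (k - 1) := by omega
  rw [this]

lemma solution_one (numbers : List Int) (k : Int) (hk : 1 ≤ k)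
    (hn : (numbers.length : Int) = 1) :
    solution numbers k = k := by
  unfold solution
  have hkt : k.toNat = (k - 1).toNat + 1 := by omega
  rw [hn, hkt, solLoopA_one_fst _ _ _ (le_refl 1)]
  omega

lemma mod_pos_eq (a b : Int) (hb : 0 < b) : PySem.Int.mod a b = a % b :=
  PySem.Int.mod_eq_emod_of_pos hb

-- ===== VERDICT (by name: the statement is the Claim_ definition above) =====
theorem solution_spec : Claim_unchanged_solution := by
  intro numbers k _ hpre hnd
  have hlen : 1 ≤ (numbers.length : Int) := by
    have : numbers.length ≠ 0 := by simpa using hpre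
    omega
  unfold solution_alt
  by_cases hk : k ≤ 0
  · simp only [if_pos hk]
    unfold solution
    have : k.toNat = 0 := by omega
    simp [this, solLoopA]
  · simp only [if_neg hk]
    rw [mod_pos_eq _ _ (by omega)]
    by_cases h1 : (numbers.length : Int) = 1
    · -- ¬D forces k = 1 here
      have hk1 : k = 1 := by
        unfold D_solution at hnd
        push Not at hnd
        have := hnd (by exact_mod_cast h1)
        omega
      rw [solution_one numbers k (by omega) h1, h1, hk1]
      decide
    · rw [solution_closed numbers k (by omega) (by omega)]

theorem solution_changed : Claim_changed_solution := by
  unfold Claim_changed_solution; decide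

theorem solution_tight : Claim_exact_solution := by
  intro numbers k _ _ hd
  obtain ⟨h1, hk⟩ := hd
  have h1' : (numbers.length : Int) = 1 := by exact_mod_cast h1
  rw [solution_one numbers k (by omega) h1']
  unfold solution_alt
  rw [if_neg (by omega), mod_pos_eq _ _ (by omega), h1']
  omega
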